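-- pv_equiv track=rewrite | github.com/o2alexanderfedin/cpp-to-c-transpiler | scripts/migrate_macro_test_to_gtest.py | extract_helper_functions
-- ===== SOURCE A (Python) =====
-- def extract_helper_functions(content: str) -> str:
--     """Extract helper functions section (not test functions, not main)."""
--     # Find the section between includes and first test function
--     lines = content.split('\n')
--     helper_lines = []
--     in_helper_section = False
--     past_includes = False
--
--     for i, line in enumerate(lines):
--         # Skip until past includes
--         if not past_includes:
--             if line.strip() and not line.strip().startswith('#include') and not line.strip().startswith('//') and not line.strip().startswith('/*'):
--                 past_includes = True
--
--         if past_includes and not in_helper_section: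
--             # Look for helper section markers
--             if 'Helper' in line or 'helper' in line or line.strip().startswith('std::unique_ptr') or line.strip().startswith('FunctionDecl') or line.strip().startswith('CallingConv'):
--                 in_helper_section = True
--
--         if in_helper_section:
--             # Stop at first test function
--             if 'void test_' in line or 'int main(' in line:
--                 break
--             # Skip macro definitions
--             if not line.strip().startswith('#define'):
--                 helper_lines.append(line)
--
--     return '\n'.join(helper_lines).strip()
-- ===== SOURCE B (Python) =====
-- def _is_content(line):
--     s = line.strip()
--     return bool(s) and not s.startswith('#include') and not s.startswith('//') and not s.startswith('/*')
--
--
-- def _is_marker(line):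
--     s = line.strip()
--     return ('Helper' in line or 'helper' in line
--             or s.startswith('std::unique_ptr')
--             or s.startswith('FunctionDecl')
--             or s.startswith('CallingConv'))
--
--
-- def _is_stop(line):
--     return 'void test_' in line or 'int main(' in line
--
--
-- def _drop_while(pred, xs):
--     for i, x in enumerate(xs):
--         if not pred(x):
--             return xs[i:]
--     return []
--
--
-- def _take_while(pred, xs):
--     out = []
--     for x in xs:
--         if not pred(x):
--             break
--         out.append(x)
--     return out
--
--
-- def extract_helper_functions(content: str) -> str:
--     """Extract helper functions section (not test functions, not main)."""
--     lines = content.split('\n')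
--     rest = _drop_while(lambda l: not _is_content(l), lines)
--     sect = _drop_while(lambda l: not _is_marker(l), rest)
--     body = _take_while(lambda l: not _is_stop(l), sect)
--     kept = [l for l in body if not l.strip().startswith('#define')]
--     return '\n'.join(kept).strip()
-- ===== Notes on version B (the rewrite author's own statement) =====
-- stated objective: simpler
-- what changed: Replaced A's single-pass state machine with two boolean flags and a break by a declarative four-stage pipeline: drop the include/comment/blank prefix, drop up to the helper marker, take until the first test/main line, filter out #define lines, then join and strip.
import Mathlib
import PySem

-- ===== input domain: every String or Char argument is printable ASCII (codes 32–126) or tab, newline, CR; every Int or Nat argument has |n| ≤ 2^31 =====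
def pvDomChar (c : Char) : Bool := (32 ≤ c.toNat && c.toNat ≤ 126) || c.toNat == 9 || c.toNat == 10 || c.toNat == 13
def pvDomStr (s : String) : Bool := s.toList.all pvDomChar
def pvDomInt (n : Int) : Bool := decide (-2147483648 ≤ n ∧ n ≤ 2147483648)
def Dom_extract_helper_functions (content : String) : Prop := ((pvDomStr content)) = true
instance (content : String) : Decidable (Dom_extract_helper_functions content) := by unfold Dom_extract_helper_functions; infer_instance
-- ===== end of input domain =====

-- B replaces A's one-pass two-flag state machine by a dropWhile/dropWhile/takeWhile/filter
-- pipeline (objective: simpler decomposition, same cost).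

-- ===== PORT A =====
-- A's loop: state = (accumulated helper lines, in_helper_section, past_includes);
-- `break` is modelled by returning the accumulator.
def pvALoop : List String → List String → Bool → Bool → List String
  | [], acc, _, _ => acc
  | l :: ls, acc, inH, past =>
    let past' := if past then true else
      (PySem.Str.strip l != "") &&
      !(PySem.Str.startswith (PySem.Str.strip l) "#include") &&
      !(PySem.Str.startswith (PySem.Str.strip l) "//") &&
      !(PySem.Str.startswith (PySem.Str.strip l) "/*")
    let inH' := if past' && !inH then
      (PySem.Str.isIn "Helper" l || PySem.Str.isIn "helper" l ||
       PySem.Str.startswith (PySem.Str.strip l) "std::unique_ptr" ||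
       PySem.Str.startswith (PySem.Str.strip l) "FunctionDecl" ||
       PySem.Str.startswith (PySem.Str.strip l) "CallingConv") || inH
      else inH
    if inH' then
      if PySem.Str.isIn "void test_" l || PySem.Str.isIn "int main(" l then acc
      else if PySem.Str.startswith (PySem.Str.strip l) "#define" then pvALoop ls acc inH' past'
      else pvALoop ls (acc ++ [l]) inH' past'
    else pvALoop ls acc inH' past'

def extract_helper_functions (content : String) : String :=
  PySem.Str.strip (PySem.Str.join "\n" (pvALoop (((PySem.Str.split? content "\n").getD [])) [] false false))

-- ===== PORT B =====
def pvIsContent (l : String) : Bool :=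
  (PySem.Str.strip l != "") &&
  !(PySem.Str.startswith (PySem.Str.strip l) "#include") &&
  !(PySem.Str.startswith (PySem.Str.strip l) "//") &&
  !(PySem.Str.startswith (PySem.Str.strip l) "/*")

def pvIsMarker (l : String) : Bool :=
  PySem.Str.isIn "Helper" l || PySem.Str.isIn "helper" l ||
  PySem.Str.startswith (PySem.Str.strip l) "std::unique_ptr" ||
  PySem.Str.startswith (PySem.Str.strip l) "FunctionDecl" ||
  PySem.Str.startswith (PySem.Str.strip l) "CallingConv"

def pvIsStop (l : String) : Bool :=
  PySem.Str.isIn "void test_" l || PySem.Str.isIn "int main(" l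

def pvIsDefine (l : String) : Bool :=
  PySem.Str.startswith (PySem.Str.strip l) "#define"

def extract_helper_functions_alt (content : String) : String :=
  let lines : List String := ((PySem.Str.split? content "\n").getD [])
  let rest := lines.dropWhile (fun l => !pvIsContent l)
  let sect := rest.dropWhile (fun l => !pvIsMarker l)
  let body := sect.takeWhile (fun l => !pvIsStop l)
  let kept := body.filter (fun l => !pvIsDefine l)
  PySem.Str.strip (PySem.Str.join "\n" kept)

-- ===== PRECONDITION & SPEC =====
def Spec_extract_helper_functions (content : String) (out : String) : Prop := out = extract_helper_functions_alt content
instance (content : String) (out : String) : Decidable (Spec_extract_helper_functions content out) := by unfold Spec_extract_helper_functions; infer_instance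

-- ===== CLAIM (what is proved, stated in full; the proofs are below) =====
def Claim_equal_extract_helper_functions : Prop := ∀ (content : String), Dom_extract_helper_functions content → Spec_extract_helper_functions content (extract_helper_functions content)

-- ===== LEMMAS AND PROOFS =====

-- The inline conditions of A's loop are B's predicates (definitional).
theorem pvA_content_eq (l : String) :
    ((PySem.Str.strip l != "") &&
     !(PySem.Str.startswith (PySem.Str.strip l) "#include") &&
     !(PySem.Str.startswith (PySem.Str.strip l) "//") &&
     !(PySem.Str.startswith (PySem.Str.strip l) "/*")) = pvIsContent l := rfl

theorem pvA_marker_eq (l : String) :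
    (PySem.Str.isIn "Helper" l || PySem.Str.isIn "helper" l ||
     PySem.Str.startswith (PySem.Str.strip l) "std::unique_ptr" ||
     PySem.Str.startswith (PySem.Str.strip l) "FunctionDecl" ||
     PySem.Str.startswith (PySem.Str.strip l) "CallingConv") = pvIsMarker l := rfl

theorem pvA_stop_eq (l : String) :
    (PySem.Str.isIn "void test_" l || PySem.Str.isIn "int main(" l) = pvIsStop l := rfl

theorem pvA_define_eq (l : String) :
    PySem.Str.startswith (PySem.Str.strip l) "#define" = pvIsDefine l := rfl

-- One step of A's loop, with the flag updates written in terms of B's predicates.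
theorem pvALoop_cons (l : String) (ls acc : List String) (inH past : Bool) :
    pvALoop (l :: ls) acc inH past =
      (if (inH || ((past || pvIsContent l) && pvIsMarker l)) then
        if pvIsStop l then acc
        else if pvIsDefine l then
          pvALoop ls acc (inH || ((past || pvIsContent l) && pvIsMarker l)) (past || pvIsContent l)
        else
          pvALoop ls (acc ++ [l]) (inH || ((past || pvIsContent l) && pvIsMarker l)) (past || pvIsContent l)
      else
        pvALoop ls acc (inH || ((past || pvIsContent l) && pvIsMarker l)) (past || pvIsContent l)) := by
  simp only [pvALoop, pvA_content_eq, pvA_marker_eq, pvA_stop_eq, pvA_define_eq]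
  cases past <;> cases inH <;> cases hc : pvIsContent l <;> cases hm : pvIsMarker l <;> simp

-- Phase 3: once in_helper_section is set, A collects non-#define lines up to the first stop line.
theorem pvALoop_inH (ls : List String) : ∀ (acc : List String) (past : Bool),
    pvALoop ls acc true past
      = acc ++ (ls.takeWhile (fun l => !pvIsStop l)).filter (fun l => !pvIsDefine l) := by
  induction ls with
  | nil => intro acc past; simp [pvALoop]
  | cons l ls ih =>
    intro acc past
    rw [pvALoop_cons]
    by_cases hs : pvIsStop l = true
    · simp [hs]
    · by_cases hd : pvIsDefine l = true <;> simp [hs, hd, ih]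

-- Phase 2: past_includes set, looking for the helper-section marker.
theorem pvALoop_past (ls : List String) : ∀ (acc : List String),
    pvALoop ls acc false true
      = acc ++ (((ls.dropWhile (fun l => !pvIsMarker l)).takeWhile
          (fun l => !pvIsStop l)).filter (fun l => !pvIsDefine l)) := by
  induction ls with
  | nil => intro acc; simp [pvALoop]
  | cons l ls ih =>
    intro acc
    rw [pvALoop_cons]
    by_cases hm : pvIsMarker l = true
    · have h2 : (l :: ls).dropWhile (fun l => !pvIsMarker l) = l :: ls := by simp [hm]
      rw [h2]
      by_cases hs : pvIsStop l = true
      · simp [hm, hs]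
      · by_cases hd : pvIsDefine l = true <;> simp [hm, hs, hd, pvALoop_inH]
    · have h2 : (l :: ls).dropWhile (fun l => !pvIsMarker l)
          = ls.dropWhile (fun l => !pvIsMarker l) := by simp [hm]
      rw [h2]
      simp [hm, ih]

-- Phase 1: skipping the include/comment/blank prefix; A checks the first real content
-- line itself for the helper marker.
theorem pvALoop_start (ls : List String) :
    pvALoop ls [] false false
      = ((((ls.dropWhile (fun l => !pvIsContent l)).dropWhile
            (fun l => !pvIsMarker l)).takeWhile
          (fun l => !pvIsStop l)).filter (fun l => !pvIsDefine l)) := by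
  induction ls with
  | nil => simp [pvALoop]
  | cons l ls ih =>
    rw [pvALoop_cons]
    by_cases hc : pvIsContent l = true
    · have h1 : (l :: ls).dropWhile (fun l => !pvIsContent l) = l :: ls := by simp [hc]
      rw [h1]
      by_cases hm : pvIsMarker l = true
      · have h2 : (l :: ls).dropWhile (fun l => !pvIsMarker l) = l :: ls := by simp [hm]
        rw [h2]
        by_cases hs : pvIsStop l = true
        · simp [hc, hm, hs]
        · by_cases hd : pvIsDefine l = true <;> simp [hc, hm, hs, hd, pvALoop_inH]
      · have h2 : (l :: ls).dropWhile (fun l => !pvIsMarker l)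
            = ls.dropWhile (fun l => !pvIsMarker l) := by simp [hm]
        rw [h2]
        simp [hc, hm, pvALoop_past]
    · have h1 : (l :: ls).dropWhile (fun l => !pvIsContent l)
          = ls.dropWhile (fun l => !pvIsContent l) := by simp [hc]
      rw [h1]
      simp [hc, ih]

-- ===== VERDICT (by name: the statement is the Claim_ definition above) =====
theorem extract_helper_functions_spec : Claim_equal_extract_helper_functions := by
  intro content _
  unfold Spec_extract_helper_functions extract_helper_functions extract_helper_functions_alt
  rw [pvALoop_start]
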